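-- pv_equiv track=rewrite | github.com/gokhanhas/Algorithm-Design | HW-03/161044067.py | nth_sublist
-- ===== SOURCE A (Python) =====
-- def nth_sublist(array, n):
--     return_list = []
--     if n > 0:
--         for i in range(0, len(array)):
--             new_array = array[0:i] + array[i+1:]
--             return_list += [new_array]
--             return_list.extend(nth_sublist(new_array, n - 1))
--     return return_list
-- ===== SOURCE B (Python) =====
-- def nth_sublist(array, n):
--     # Explicit stack-based preorder traversal instead of recursion.
--     result = []
--     stack = []
--     if n > 0:
--         for i in range(len(array) - 1, -1, -1):
--             stack.append((array[:i] + array[i + 1:], n - 1))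
--     while stack:
--         arr, b = stack.pop()
--         result.append(arr)
--         if b > 0:
--             for i in range(len(arr) - 1, -1, -1):
--                 stack.append((arr[:i] + arr[i + 1:], b - 1))
--     return result
-- ===== Notes on version B (the rewrite author's own statement) =====
-- stated objective: alternative
-- what changed: Replaced the recursive generator by an iterative explicit-stack preorder traversal over (sublist, budget) work items, pushing children in reverse so the leftmost is expanded first.
import Mathlib
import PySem

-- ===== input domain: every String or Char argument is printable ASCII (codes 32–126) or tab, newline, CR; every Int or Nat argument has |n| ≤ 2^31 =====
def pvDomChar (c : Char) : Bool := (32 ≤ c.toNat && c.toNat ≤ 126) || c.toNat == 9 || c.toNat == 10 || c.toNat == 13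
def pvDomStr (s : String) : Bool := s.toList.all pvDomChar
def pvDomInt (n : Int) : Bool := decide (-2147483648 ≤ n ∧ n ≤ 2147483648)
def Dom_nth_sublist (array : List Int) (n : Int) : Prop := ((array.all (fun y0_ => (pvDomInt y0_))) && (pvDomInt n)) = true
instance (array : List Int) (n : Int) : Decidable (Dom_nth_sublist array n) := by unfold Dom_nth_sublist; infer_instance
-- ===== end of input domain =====

-- B replaces A's recursion by an iterative explicit-stack preorder traversal; same cost, no speed claim.

-- ===== PORT A =====
-- A recurses on the Int budget n; the port recurses on the fuel n.toNat, which equals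
-- the number of remaining recursion levels since the Python only recurses while n > 0.
mutual
  -- the 'for i in range(0, len(array))' loop, accumulating return_list
  def nthA_go (m : Nat) (array : List Int) : List Nat → List (List Int) → List (List Int)
    | [], acc => acc
    | i :: is, acc =>
        let new_array := PySem.List.slice array (some 0) (some (i : Int)) ++
                         PySem.List.slice array (some ((i : Int) + 1)) none
        nthA_go m array is ((acc ++ [new_array]) ++ nthA_fuel m new_array)
  termination_by is _ => (m, is.length + 1)
  def nthA_fuel : Nat → List Int → List (List Int)
    | 0, _ => []
    | m + 1, array => nthA_go m array (List.range array.length) []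
  termination_by m _ => (m, 0)
end

def nth_sublist (array : List Int) (n : Int) : List (List Int) :=
  nthA_fuel n.toNat array

-- ===== PORT B =====
-- Python's arr[:i] + arr[i+1:] for a Nat index i is exactly take/drop (nonnegative bounds).
-- Source B pushes the one-element removals with budget b-1 in reverse onto its stack, so the
-- leftmost child is on top; here the stack is a list with head = top, so the children are
-- prepended in left-to-right order. pushB arr b is what one pop of (arr, b) pushes.
def pushB (arr : List Int) (b : Nat) : List (List Int × Nat) :=
  if b > 0 then (List.range arr.length).map (fun i => (arr.take i ++ arr.drop (i + 1), b - 1))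
  else []

-- termination measure for the while loop: an upper bound on the nodes a work item yields
def wB (L : Nat) : Nat → Nat
  | 0 => 1
  | b + 1 => 1 + L * wB (L - 1) b

def measB (st : List (List Int × Nat)) : Nat := (st.map (fun p => wB p.1.length p.2)).sum

theorem measB_pushB_lt (arr : List Int) (b : Nat) : measB (pushB arr b) < wB arr.length b := by
  cases b with
  | zero => simp [measB, pushB, wB]
  | succ c =>
      simp only [measB, pushB, Nat.succ_sub_one, if_pos (Nat.succ_pos c), List.map_map]
      have h : ∀ i ∈ List.range arr.length,
          (fun i => wB (arr.take i ++ arr.drop (i + 1)).length c) i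
            = (fun _ => wB (arr.length - 1) c) i := by
        intro i hi
        simp only [List.mem_range] at hi
        have : (arr.take i ++ arr.drop (i + 1)).length = arr.length - 1 := by
          simp [List.length_take, List.length_drop]; omega
        simp [this]
      rw [show ((List.range arr.length).map ((fun p : List Int × Nat => wB p.1.length p.2) ∘
            (fun i => (arr.take i ++ arr.drop (i + 1), c)))) =
          (List.range arr.length).map (fun _ => wB (arr.length - 1) c) from
            List.map_congr_left h]
      simp [List.map_const', wB]

-- the while loop of Source B: pop the top item, emit its list, push its children
def runB : List (List Int × Nat) → List (List Int)
  | [] => []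
  | (arr, b) :: rest => arr :: runB (pushB arr b ++ rest)
termination_by st => measB st
decreasing_by
  simp only [measB, List.map_append, List.sum_append, List.map_cons, List.sum_cons]
  have := measB_pushB_lt arr b
  simp only [measB] at this
  omega

-- seeding in Source B is the same push step applied to the root with budget n (emit nothing)
def nth_sublist_alt (array : List Int) (n : Int) : List (List Int) :=
  runB (pushB array n.toNat)

-- ===== PRECONDITION & SPEC =====
def Spec_nth_sublist (array : List Int) (n : Int) (out : List (List Int)) : Prop := out = nth_sublist_alt array n
instance (array : List Int) (n : Int) (out : List (List Int)) : Decidable (Spec_nth_sublist array n out) := by unfold Spec_nth_sublist; infer_instance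

-- ===== CLAIM (what is proved, stated in full; the proofs are below) =====
def Claim_equal_nth_sublist : Prop := ∀ (array : List Int) (n : Int), Dom_nth_sublist array n → Spec_nth_sublist array n (nth_sublist array n)

-- ===== LEMMAS AND PROOFS =====

-- A's sliced child equals B's take/drop child (natural-number index, unconditionally)
theorem childA_eq (arr : List Int) (i : Nat) :
    PySem.List.slice arr (some 0) (some (i : Int)) ++
      PySem.List.slice arr (some ((i : Int) + 1)) none
      = arr.take i ++ arr.drop (i + 1) := by
  have h1 : PySem.List.slice arr (some 0) (some (i : Int)) = arr.take i := by
    rw [PySem.List.slice_zero_start, PySem.List.slice_to_natCast]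
  have h2 : PySem.List.slice arr (some ((i : Int) + 1)) none = arr.drop (i + 1) := by
    have : ((i : Int) + 1) = ((i + 1 : Nat) : Int) := by push_cast; ring
    rw [this, PySem.List.slice_from_natCast]
  rw [h1, h2]

-- A's loop characterised as a flatMap over the index list
theorem nthA_go_eq (m : Nat) (arr : List Int) (is : List Nat) (acc : List (List Int)) :
    nthA_go m arr is acc
      = acc ++ is.flatMap (fun i =>
          (arr.take i ++ arr.drop (i + 1)) :: nthA_fuel m (arr.take i ++ arr.drop (i + 1))) := by
  induction is generalizing acc with
  | nil => simp [nthA_go]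
  | cons i is ih =>
      rw [nthA_go, childA_eq, ih]
      simp [List.flatMap_cons]

-- one pop's pushed children, fully expanded, are exactly A's recursion at that node
theorem pushB_flatMap (arr : List Int) (b : Nat) :
    (pushB arr b).flatMap (fun p => p.1 :: nthA_fuel p.2 p.1) = nthA_fuel b arr := by
  cases b with
  | zero => simp [pushB, nthA_fuel]
  | succ c =>
      rw [nthA_fuel, nthA_go_eq]
      simp [pushB, List.flatMap_map]

-- the stack loop emits each pending item followed by its whole subtree, in order
theorem runB_eq (st : List (List Int × Nat)) :
    runB st = st.flatMap (fun p => p.1 :: nthA_fuel p.2 p.1) := by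
  fun_induction runB with
  | case1 => simp
  | case2 arr b rest ih =>
      rw [ih]
      simp [List.flatMap_append, pushB_flatMap]

-- ===== VERDICT (by name: the statement is the Claim_ definition above) =====
theorem nth_sublist_spec : Claim_equal_nth_sublist := by
  intro array n _
  unfold Spec_nth_sublist nth_sublist nth_sublist_alt
  rw [runB_eq, pushB_flatMap]
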